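-- pv_equiv track=rewrite | github.com/viktorbarabash85/Homework | src/generators.py | card_number_generator
-- ===== SOURCE A (Python) =====
-- from typing import Iterator
--
-- def card_number_generator(start: int, stop: int) -> Iterator[str]:
--     """
--     Генератор, который выдает номера банковских карт в формате XXXX XXXX XXXX XXXX, где X — цифра номера карты.
--     Генерирует номера карт в заданном диапазоне от 0000 0000 0000 0001 до 9999 9999 9999 9999.
--     Принимает начальное и конечное значения для генерации диапазона номеров.
--     """
--     for num in range(start, stop + 1):
--         number = "0" * (16 - len(str(num))) + str(num)
--
--         string_to_return = ""
--         block_counter = 0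
--
--         for digit in number:
--             block_counter += 1
--             if block_counter <= 4:
--                 string_to_return += digit
--             else:
--                 string_to_return += " " + digit
--                 block_counter = 1
--
--         yield string_to_return
-- ===== SOURCE B (Python) =====
-- from typing import Iterator
--
-- def card_number_generator(start: int, stop: int) -> Iterator[str]:
--     for num in range(start, stop + 1):
--         number = str(num).rjust(16, "0")
--         yield " ".join(number[i:i + 4] for i in range(0, len(number), 4))
-- ===== Notes on version B (the rewrite author's own statement) =====
-- stated objective: idiomatic
-- what changed: A builds each formatted number character-by-character with a resetting block counter; B pads once with str.rjust(16,'0') and joins 4-character slices taken at block boundaries.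
import Mathlib
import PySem

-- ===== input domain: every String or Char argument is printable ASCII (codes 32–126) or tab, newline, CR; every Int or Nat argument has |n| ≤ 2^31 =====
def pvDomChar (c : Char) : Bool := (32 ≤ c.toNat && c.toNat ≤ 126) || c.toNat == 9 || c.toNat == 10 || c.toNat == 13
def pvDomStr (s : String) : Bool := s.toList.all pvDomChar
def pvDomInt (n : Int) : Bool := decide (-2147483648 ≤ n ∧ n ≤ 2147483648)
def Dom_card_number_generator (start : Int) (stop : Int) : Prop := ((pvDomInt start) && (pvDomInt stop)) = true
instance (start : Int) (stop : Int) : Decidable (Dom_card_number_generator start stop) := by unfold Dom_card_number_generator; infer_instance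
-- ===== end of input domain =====

-- B replaces A's per-character loop with its resetting block counter by joining 4-character
-- slices over block boundaries (idiomatic decomposition; same cost, return values proved equal).

-- ===== PORT A =====
-- one step of A's inner loop: state = (string_to_return, block_counter)
def cngStep (st : List Char × Int) (digit : Char) : List Char × Int :=
  let bc := st.2 + 1
  if bc ≤ 4 then (st.1 ++ [digit], bc) else (st.1 ++ [' ', digit], 1)

def card_number_generator (start : Int) (stop : Int) : List String :=
  (PySem.List.pyRange start (stop + 1) 1).map (fun num =>
    let s := PySem.Int.toChars num
    let number := PySem.List.pyRepeat ['0'] (16 - (s.length : Int)) ++ s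
    String.ofList ((number.foldl cngStep ([], 0)).1))

-- ===== PORT B =====
-- exact port of str.rjust(16, '0'): prepend max(0, 16 - len) fill characters (Nat subtraction)
def cngRjust (s : List Char) : List Char := List.replicate (16 - s.length) '0' ++ s

def card_number_generator_alt (start : Int) (stop : Int) : List String :=
  (PySem.List.pyRange start (stop + 1) 1).map (fun num =>
    let number := cngRjust (PySem.Int.toChars num)
    String.ofList (PySem.Chars.join [' ']
      ((PySem.List.pyRange 0 (number.length : Int) 4).map
        (fun i => PySem.List.slice number (some i) (some (i + 4))))))

-- ===== PRECONDITION & SPEC =====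
def Spec_card_number_generator (start : Int) (stop : Int) (out : List String) : Prop := out = card_number_generator_alt start stop
instance (start : Int) (stop : Int) (out : List String) : Decidable (Spec_card_number_generator start stop out) := by unfold Spec_card_number_generator; infer_instance

-- ===== CLAIM (what is proved, stated in full; the proofs are below) =====
def Claim_equal_card_number_generator : Prop := ∀ (start : Int) (stop : Int), Dom_card_number_generator start stop → Spec_card_number_generator start stop (card_number_generator start stop)

-- ===== LEMMAS AND PROOFS =====

-- structural 4-chunking, the common reference point of both grouping computations
def cngChunksRec (l : List Char) : List (List Char) :=
  if _h : l = [] then [] else l.take 4 :: cngChunksRec (l.drop 4)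
termination_by l.length
decreasing_by
  have : 0 < l.length := List.length_pos_of_ne_nil _h
  simp [List.length_drop]; omega

theorem cng_pad_eq (s : List Char) :
    PySem.List.pyRepeat ['0'] (16 - (s.length : Int)) ++ s = cngRjust s := by
  rw [PySem.List.pyRepeat_singleton, cngRjust]
  congr 1
  congr 1
  omega

theorem cng_chunksRec_nil : cngChunksRec [] = [] := by
  rw [cngChunksRec]; simp

theorem cng_chunksRec_cons (l : List Char) (h : l ≠ []) :
    cngChunksRec l = l.take 4 :: cngChunksRec (l.drop 4) := by
  rw [cngChunksRec]; simp [h]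

theorem cng_range_chunks (n : Nat) (l : List Char) (hl : l.length ≤ n) :
    (List.range ((l.length + 3) / 4)).map (fun k => (l.drop (4 * k)).take 4)
      = cngChunksRec l := by
  induction n generalizing l with
  | zero =>
    have : l = [] := List.eq_nil_of_length_eq_zero (by omega)
    subst this; simp [cng_chunksRec_nil]
  | succ n ih =>
    by_cases h : l = []
    · subst h; simp [cng_chunksRec_nil]
    · have hpos : 0 < l.length := List.length_pos_of_ne_nil h
      have hm : (l.length + 3) / 4 = ((l.drop 4).length + 3) / 4 + 1 := by
        simp [List.length_drop]; omega
      rw [hm, List.range_succ_eq_map, List.map_cons, List.map_map,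
        cng_chunksRec_cons l h]
      congr 1
      have ih2 := ih (l.drop 4) (by simp [List.length_drop]; omega)
      simp only [List.length_drop] at ih2 ⊢
      rw [← ih2]
      exact List.map_congr_left (fun k _ => by
        simp only [Function.comp, List.drop_drop]; congr 2; omega)

theorem cng_chunks_eq (l : List Char) :
    (PySem.List.pyRange 0 (l.length : Int) 4).map
        (fun i => PySem.List.slice l (some i) (some (i + 4)))
      = cngChunksRec l := by
  rw [PySem.List.pyRange_of_pos 0 (l.length : Int) (by norm_num)]
  rw [List.map_map]
  rw [← cng_range_chunks l.length l le_rfl]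
  have hcnt : (if (0:Int) < (l.length : Int) then (((l.length : Int) - 0 + 4 - 1) / 4).toNat else 0)
      = (l.length + 3) / 4 := by
    split_ifs with h
    · omega
    · omega
  rw [hcnt]
  apply List.map_congr_left
  intro k _
  show PySem.List.slice l (some (0 + 4 * (k : Int))) (some (0 + 4 * (k : Int) + 4)) = _
  rw [PySem.List.slice_toNat l (by positivity) (by positivity)]
  congr 1
  · omega
  · congr 1
    omega

-- the accumulator of A's fold only ever grows on the right
theorem cng_fold_shift (l : List Char) (acc : List Char) (k : Int) :
    (l.foldl cngStep (acc, k)).1 = acc ++ (l.foldl cngStep ([], k)).1 := by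
  induction l generalizing acc k with
  | nil => simp
  | cons d t ih =>
    simp only [List.foldl_cons, cngStep]
    split_ifs with h
    · rw [ih (acc ++ [d]) (k + 1)]
      simp only [List.nil_append]
      rw [ih [d] (k + 1)]; simp
    · rw [ih (acc ++ [' ', d]) 1]
      simp only [List.nil_append]
      rw [ih [' ', d] 1]; simp

theorem cng_group_eq (n : Nat) (l : List Char) (hl : l.length ≤ n) :
    (l.foldl cngStep ([], 0)).1 = PySem.Chars.join [' '] (cngChunksRec l) := by
  induction n generalizing l with
  | zero =>
    have : l = [] := List.eq_nil_of_length_eq_zero (by omega)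
    subst this; simp [cng_chunksRec_nil, PySem.Chars.join_nil]
  | succ n ih =>
    match l with
    | [] => simp [cng_chunksRec_nil, PySem.Chars.join_nil]
    | [a] =>
      rw [cng_chunksRec_cons _ (by simp)]
      simp [cng_chunksRec_nil, PySem.Chars.join_singleton, cngStep]
    | [a, b] =>
      rw [cng_chunksRec_cons _ (by simp)]
      simp [cng_chunksRec_nil, PySem.Chars.join_singleton, cngStep]
    | [a, b, c] =>
      rw [cng_chunksRec_cons _ (by simp)]
      simp [cng_chunksRec_nil, PySem.Chars.join_singleton, cngStep]
    | [a, b, c, d] =>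
      rw [cng_chunksRec_cons _ (by simp)]
      simp [cng_chunksRec_nil, PySem.Chars.join_singleton, cngStep]
    | a :: b :: c :: d :: e :: t =>
      have ihe := ih (e :: t) (by simp at hl ⊢; omega)
      have hG : ((e :: t).foldl cngStep ([], 0)).1 = e :: (t.foldl cngStep ([], 1)).1 := by
        simp only [List.foldl_cons, cngStep]
        norm_num
        rw [cng_fold_shift t]
        simp
      rw [hG] at ihe
      have hrec : cngChunksRec (e :: t) ≠ [] := by
        rw [cng_chunksRec_cons _ (by simp)]; simp
      obtain ⟨q, rest, hq⟩ := List.exists_cons_of_ne_nil hrec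
      rw [cng_chunksRec_cons (a :: b :: c :: d :: e :: t) (by simp),
        show (a :: b :: c :: d :: e :: t).take 4 = [a, b, c, d] from rfl,
        show (a :: b :: c :: d :: e :: t).drop 4 = e :: t from rfl,
        hq, PySem.Chars.join_cons_cons]
      rw [hq] at ihe
      rw [← ihe]
      simp only [List.foldl_cons, cngStep]
      norm_num
      rw [cng_fold_shift t]
      simp

theorem cng_body_eq (num : Int) :
    (let s := PySem.Int.toChars num
     let number := PySem.List.pyRepeat ['0'] (16 - (s.length : Int)) ++ s
     String.ofList ((number.foldl cngStep ([], 0)).1))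
    = (let number := cngRjust (PySem.Int.toChars num)
       String.ofList (PySem.Chars.join [' ']
         ((PySem.List.pyRange 0 (number.length : Int) 4).map
           (fun i => PySem.List.slice number (some i) (some (i + 4)))))) := by
  simp only [cng_pad_eq]
  congr 1
  rw [cng_group_eq (cngRjust (PySem.Int.toChars num)).length _ le_rfl,
    cng_chunks_eq]

-- ===== VERDICT (by name: the statement is the Claim_ definition above) =====
theorem card_number_generator_spec : Claim_equal_card_number_generator := by
  intro start stop _
  unfold Spec_card_number_generator card_number_generator card_number_generator_alt
  exact List.map_congr_left (fun num _ => cng_body_eq num)
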